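-- pv_equiv track=rewrite | github.com/DivOnYT/Questionnaire | main/main.py | search_char
-- ===== SOURCE A (Python) =====
-- def search_char(list_char, ligne: str, mainList=None):
--     """
--     Fonction permettant de faire une liste avec la ligne de question
--     :param list_char: la liste des caractères a reécuperer
--     :param ligne: la ligne sur laquelle le programme travaille
--     :param count: le nombre
--     :param mainList: liste principale avec les différentes questions etc
--     :return:  mainList
--     """
--     if mainList is None:
--         mainList = []
--
--     charlist = list_char # pour ne pas modifier la liste accidentellement
--
--     if charlist == []:
--         return mainList
--
--     elif list_char[0] not in ligne: # si le symbole n'est pas dans ce qu'il reste de la ligne on passe exemple le D dans une ligne a seulement 3 questions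
--         mainList = search_char(charlist[1:], ligne, mainList) # on cherche la prochaine reponse
--         return mainList # on retourne le mainList sans y toucher
--     else:
--         for index, x in enumerate(ligne): # pour chaque caractère de la ligne
--             if charlist[0] == ligne[index:index + len(charlist[0])]: # si le symbole A est le caractère x par ex et que après il y a un - donc A- a la suite
--                 mainList.append(ligne[:index]) # on ajoute l'avant de la ligne
--                 mainList = search_char(charlist[1:], ligne[index:], mainList) # recursivité
--                 return mainList # on renvoie la liste finie
-- ===== SOURCE B (Python) =====
-- def search_char(list_char, ligne: str, mainList=None):
--     """Iterative one-pass rewrite: fold over the markers with (mainList, remaining line) state, using str.find."""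
--     if mainList is None:
--         mainList = []
--     rest = ligne
--     for marker in list_char:
--         i = rest.find(marker)
--         if i != -1:
--             mainList.append(rest[:i])
--             rest = rest[i:]
--     return mainList
-- ===== Notes on version B (the rewrite author's own statement) =====
-- stated objective: simpler
-- what changed: Replaces A's recursion on the marker list with a hand-written per-index enumerate scan by a single iterative loop over the markers keeping (mainList, remaining line) state and locating each marker with str.find (C-level substring search).
-- outside the precondition, e.g. on search_char([''], '', None): A returns None, B returns ['']
import Mathlib
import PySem

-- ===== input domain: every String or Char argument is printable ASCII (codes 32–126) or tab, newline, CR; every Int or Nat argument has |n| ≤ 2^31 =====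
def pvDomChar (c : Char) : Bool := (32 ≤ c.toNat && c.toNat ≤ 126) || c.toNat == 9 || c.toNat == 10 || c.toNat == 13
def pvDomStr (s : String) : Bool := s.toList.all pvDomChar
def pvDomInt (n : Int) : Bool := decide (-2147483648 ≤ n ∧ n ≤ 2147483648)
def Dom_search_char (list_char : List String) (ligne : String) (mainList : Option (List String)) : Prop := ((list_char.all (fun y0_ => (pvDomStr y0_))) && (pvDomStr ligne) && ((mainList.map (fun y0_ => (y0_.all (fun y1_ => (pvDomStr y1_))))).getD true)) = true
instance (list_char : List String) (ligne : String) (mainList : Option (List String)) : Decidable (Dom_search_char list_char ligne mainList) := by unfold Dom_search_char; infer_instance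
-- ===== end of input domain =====

-- B replaces A's recursion-with-inner-index-scan by one iterative fold over the markers using str.find (objective: simpler).
-- Both A and B append to the caller's mainList in place (the same mutation); the equivalence proved is about the return value.

-- ===== PORT A =====
-- A's inner 'for index, x in enumerate(ligne)' loop: first index whose slice equals the marker (none = fell through the loop)
def searchCharScanA (c ligne : String) : Option Nat :=
  (List.range ligne.toList.length).find? (fun i =>
    PySem.Str.slice ligne (some (i : Int)) (some ((i : Int) + ((c.toList.length : Nat) : Int))) == c)

def searchCharGoA : List String → String → List String → List String
  | [], _, mL => mL
  | c :: rest, ligne, mL =>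
    if PySem.Str.isIn c ligne = false then
      searchCharGoA rest ligne mL
    else
      match searchCharScanA c ligne with
      | some i =>
          searchCharGoA rest (PySem.Str.slice ligne (some (i : Int)) none)
            (mL ++ [PySem.Str.slice ligne none (some (i : Int))])
      | none => mL   -- Python falls through the for-loop and returns None here; excluded by Pre_

def search_char (list_char : List String) (ligne : String) (mainList : Option (List String)) : List String :=
  searchCharGoA list_char ligne (mainList.getD [])

-- ===== PORT B =====
def searchCharStepB (acc : List String × String) (marker : String) : List String × String :=
  let i := PySem.Str.find acc.2 marker
  if i ≠ -1 then
    (acc.1 ++ [PySem.Str.slice acc.2 none (some i)], PySem.Str.slice acc.2 (some i) none)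
  else acc

def search_char_alt (list_char : List String) (ligne : String) (mainList : Option (List String)) : List String :=
  (list_char.foldl searchCharStepB (mainList.getD [], ligne)).1

-- ===== PRECONDITION & SPEC =====
-- Pre_ excludes exactly the inputs with ligne = '' and '' among the markers, on which A's inner
-- for-loop falls through and A returns None — not a value of the declared list-of-strings type.
def Pre_search_char (list_char : List String) (ligne : String) (mainList : Option (List String)) : Prop :=
  ¬ (ligne = "" ∧ "" ∈ list_char)
instance (list_char : List String) (ligne : String) (mainList : Option (List String)) : Decidable (Pre_search_char list_char ligne mainList) := by unfold Pre_search_char; infer_instance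

def pvWitness_search_char : List String × String × Option (List String) := (["A-", "B-"], "A- oui B- non", none)

def Spec_search_char (list_char : List String) (ligne : String) (mainList : Option (List String)) (out : List String) : Prop := out = search_char_alt list_char ligne mainList
instance (list_char : List String) (ligne : String) (mainList : Option (List String)) (out : List String) : Decidable (Spec_search_char list_char ligne mainList out) := by unfold Spec_search_char; infer_instance

-- ===== CLAIM (what is proved, stated in full; the proofs are below) =====
def Claim_equal_search_char : Prop := ∀ (list_char : List String) (ligne : String) (mainList : Option (List String)), Dom_search_char list_char ligne mainList → Pre_search_char list_char ligne mainList → Spec_search_char list_char ligne mainList (search_char list_char ligne mainList)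

-- ===== LEMMAS AND PROOFS =====

lemma searchChar_find?_range_eq_some {p : Nat → Bool} {n m : Nat} (hm : m < n)
    (hp : p m = true) (hmin : ∀ k < m, p k = false) :
    (List.range n).find? p = some m := by
  rw [List.find?_eq_some_iff_getElem]
  refine ⟨hp, m, by simpa using hm, by simp, ?_⟩
  intro j hj
  simp only [List.getElem_range]
  simp [hmin j (by simpa using hj)]

-- A's loop test 'charlist[0] == ligne[index:index+len(charlist[0])]' says the marker occurs at that index
lemma searchChar_pred_eq (c ligne : String) (i : Nat) :
    (PySem.Str.slice ligne (some (i : Int)) (some ((i : Int) + ((c.toList.length : Nat) : Int))) == c)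
      = decide (c.toList <+: ligne.toList.drop i) := by
  rw [Bool.eq_iff_iff, beq_iff_eq, decide_eq_true_iff]
  rw [← String.toList_inj]
  simp only [PySem.Str.toList_slice, PySem.Chars.slice_eq_listSlice, PySem.List.slice_natCast_add]
  rw [List.prefix_iff_eq_take]
  exact eq_comm

-- A's inner scan finds exactly Python's str.find position when the marker occurs and the line is nonempty
lemma searchCharScanA_eq (c ligne : String) (hlig : ligne.toList ≠ [])
    (hin : PySem.Str.isIn c ligne = true) :
    searchCharScanA c ligne = some (PySem.Str.find ligne c).toNat := by
  have hinf : c.toList <:+: ligne.toList := (PySem.Str.isIn_iff_infix c ligne).mp hin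
  have h0 : 0 ≤ PySem.Chars.find ligne.toList c.toList :=
    (PySem.Chars.find_nonneg_iff ligne.toList c.toList).mpr hinf
  have hspec := PySem.Chars.find_spec (s := ligne.toList) (sub := c.toList) h0
  rw [PySem.Str.find_eq]
  set f := (PySem.Chars.find ligne.toList c.toList).toNat with hf
  have hflt : f < ligne.toList.length := by
    by_cases hc : c.toList = []
    · have h2 : PySem.Chars.find ligne.toList c.toList = 0 := by
        rw [hc]; exact PySem.Chars.find_nil _
      have h3 := List.length_pos_iff.mpr hlig
      omega
    · have hle := hspec.1.length_le
      have hcl : 1 ≤ c.toList.length := List.length_pos_iff.mpr hc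
      have h4 := PySem.Chars.find_le_length ligne.toList c.toList
      simp only [List.length_drop] at hle
      omega
  unfold searchCharScanA
  apply searchChar_find?_range_eq_some hflt
  · rw [searchChar_pred_eq]; exact decide_eq_true hspec.1
  · intro k hk; rw [searchChar_pred_eq]; exact decide_eq_false (hspec.2 k hk)

lemma searchChar_find_lt (c ligne : String) (hlig : ligne.toList ≠ [])
    (hin : PySem.Str.isIn c ligne = true) :
    (PySem.Str.find ligne c).toNat < ligne.toList.length := by
  have hinf : c.toList <:+: ligne.toList := (PySem.Str.isIn_iff_infix c ligne).mp hin
  have h0 : 0 ≤ PySem.Chars.find ligne.toList c.toList :=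
    (PySem.Chars.find_nonneg_iff ligne.toList c.toList).mpr hinf
  have hspec := PySem.Chars.find_spec (s := ligne.toList) (sub := c.toList) h0
  rw [PySem.Str.find_eq]
  by_cases hc : c.toList = []
  · have h2 : PySem.Chars.find ligne.toList c.toList = 0 := by
      rw [hc]; exact PySem.Chars.find_nil _
    have h3 := List.length_pos_iff.mpr hlig
    omega
  · have hle := hspec.1.length_le
    have hcl : 1 ≤ c.toList.length := List.length_pos_iff.mpr hc
    have h4 := PySem.Chars.find_le_length ligne.toList c.toList
    simp only [List.length_drop] at hle
    omega

-- the loop invariant: A's recursion and B's fold carry the same (accumulated list, remaining line) state;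
-- the disjunction says the line is nonempty, or it is empty and no empty marker remains
lemma searchCharGo_eq (lc : List String) (ligne : String) (mL : List String)
    (h : ligne.toList ≠ [] ∨ "" ∉ lc) :
    searchCharGoA lc ligne mL = (lc.foldl searchCharStepB (mL, ligne)).1 := by
  induction lc generalizing ligne mL with
  | nil => simp [searchCharGoA]
  | cons c rest ih =>
    rw [List.foldl_cons]
    by_cases hin : PySem.Str.isIn c ligne = true
    · have hlig : ligne.toList ≠ [] := by
        rcases h with h | h
        · exact h
        · intro hnil
          have hc : c ≠ "" := fun hc => h (by simp [hc])
          have hinf := (PySem.Str.isIn_iff_infix c ligne).mp hin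
          rw [hnil] at hinf
          obtain ⟨s, t, hst⟩ := hinf
          simp only [List.append_eq_nil_iff] at hst
          exact hc (String.toList_inj.mp (by simp [hst.1.2]))
      have h0 : 0 ≤ PySem.Str.find ligne c := by
        rw [PySem.Str.find_eq]
        exact (PySem.Chars.find_nonneg_iff _ _).mpr ((PySem.Str.isIn_iff_infix c ligne).mp hin)
      have hscan := searchCharScanA_eq c ligne hlig hin
      have hcast : ((PySem.Str.find ligne c).toNat : Int) = PySem.Str.find ligne c :=
        Int.toNat_of_nonneg h0
      rw [searchCharGoA, if_neg (fun hF => by rw [hF] at hin; cases hin), hscan]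
      have hne : PySem.Str.find ligne c ≠ -1 := by omega
      have hstep : searchCharStepB (mL, ligne) c =
          (mL ++ [PySem.Str.slice ligne none (some ((PySem.Str.find ligne c).toNat : Int))],
           PySem.Str.slice ligne (some ((PySem.Str.find ligne c).toNat : Int)) none) := by
        unfold searchCharStepB
        rw [if_pos hne, hcast]
      rw [hstep]
      apply ih
      left
      have hflt := searchChar_find_lt c ligne hlig hin
      simp only [PySem.Str.toList_slice, PySem.Chars.slice_eq_listSlice]
      rw [PySem.List.slice_from_natCast]
      intro hnil
      have hlen := congrArg List.length hnil
      simp only [List.length_drop, List.length_nil] at hlen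
      omega
    · have hfneg : PySem.Str.find ligne c = -1 := by
        rw [PySem.Str.find_eq, PySem.Chars.find_eq_neg_one_iff]
        intro hinf
        exact hin ((PySem.Str.isIn_iff_infix c ligne).mpr hinf)
      rw [searchCharGoA,
        if_pos (by cases hF : PySem.Str.isIn c ligne with
                   | false => rfl
                   | true => exact absurd hF hin)]
      have hstep2 : searchCharStepB (mL, ligne) c = (mL, ligne) := by
        simp only [searchCharStepB, hfneg]
        simp
      rw [hstep2]
      apply ih
      rcases h with h | h
      · exact Or.inl h
      · exact Or.inr (fun hm => h (List.mem_cons_of_mem _ hm))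

-- ===== VERDICT (by name: the statement is the Claim_ definition above) =====
theorem search_char_spec : Claim_equal_search_char := by
  intro lc ligne mL _ hpre
  unfold Pre_search_char at hpre
  unfold Spec_search_char search_char search_char_alt
  apply searchCharGo_eq
  by_cases hl : ligne = ""
  · right; intro hmem; exact hpre ⟨hl, hmem⟩
  · left; intro hnil; exact hl (String.toList_eq_nil_iff.mp hnil)
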